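-- pv_equiv track=rewrite | github.com/swunoo/LearnPy | markovAnalysis.py | make_dict_uno
-- ===== SOURCE A (Python) =====
-- def make_dict_uno(file):
--
--     word_dict = dict()
--
--     for line in file:
--         line_list = line.strip().split(' ')
--
--         for i in range(0,len(line_list) - 1):
--             if(line_list[i] in word_dict):
--                 if(line_list[i+1] in word_dict[line_list[i]]):
--                     word_dict[line_list[i]][line_list[i+1]] += 1
--                 else:
--                     word_dict[line_list[i]][line_list[i+1]] = 1
--             else:
--                 word_dict[line_list[i]] = {line_list[i+1] : 1}
--
--     return word_dict
-- ===== SOURCE B (Python) =====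
-- # B: zip-based pair extraction into a flat tuple-keyed counter, then a regroup pass with setdefault.
-- def make_dict_uno(file):
--     flat = {}
--     for line in file:
--         ws = line.strip().split(' ')
--         for p in zip(ws, ws[1:]):
--             flat[p] = flat.get(p, 0) + 1
--     result = {}
--     for (w1, w2), c in flat.items():
--         result.setdefault(w1, {})[w2] = c
--     return result
-- ===== Notes on version B (the rewrite author's own statement) =====
-- stated objective: alternative
-- what changed: Replaces A's indexed loop with nested dict-of-dict increments (three-way branching inside the scan) by a two-pass decomposition: pass one walks zip(ws, ws[1:]) accumulating a flat counter keyed by (w1, w2) tuples, pass two regroups that flat table into the nested dict via setdefault.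
import Mathlib
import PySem

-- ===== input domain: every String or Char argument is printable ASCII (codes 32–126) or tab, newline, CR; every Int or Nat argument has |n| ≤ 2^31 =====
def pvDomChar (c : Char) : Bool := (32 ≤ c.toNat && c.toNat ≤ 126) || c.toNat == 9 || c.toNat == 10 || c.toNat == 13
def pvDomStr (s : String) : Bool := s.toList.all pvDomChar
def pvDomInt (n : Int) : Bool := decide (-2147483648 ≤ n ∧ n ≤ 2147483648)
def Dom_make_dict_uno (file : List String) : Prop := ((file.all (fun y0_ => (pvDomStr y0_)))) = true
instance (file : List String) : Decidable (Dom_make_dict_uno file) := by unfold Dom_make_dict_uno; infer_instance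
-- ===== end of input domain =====

-- B extracts adjacent pairs with zip(ws, ws[1:]) into one flat tuple-keyed counter and regroups
-- that table with setdefault in a second pass, instead of A's indexed nested dict-of-dict
-- increments; same cost, different decomposition.

-- ===== PORT A =====
-- line.strip().split(' '): the separator " " is non-empty, so split? is always `some`; getD [] is exact
def pvWords (line : String) : List String :=
  (PySem.Str.split? (PySem.Str.strip line) " ").getD []

-- literal transliteration of A: nested dict-of-dict with the three-way branch inside the index
-- loop; line_list[i] / line_list[i+1] are always in range for i in range(0, len-1), so pyGetD is
-- exact; the in-place `word_dict[w1][w2] = …` is rendered as insert (overwrite keeps position)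
def make_dict_uno (file : List String) : List (String × List (String × Int)) :=
  let word_dict :=
    file.foldl (fun wd line =>
      (PySem.List.pyRange 0 (((pvWords line).length : Int) - 1)).foldl (fun wd i =>
        let a := PySem.List.pyGetD (pvWords line) i ""
        let b := PySem.List.pyGetD (pvWords line) (i + 1) ""
        if wd.contains a then
          if (wd.getD a PySem.Dict.empty).contains b then
            wd.insert a ((wd.getD a PySem.Dict.empty).insert b
              ((wd.getD a PySem.Dict.empty).getD b 0 + 1))
          else
            wd.insert a ((wd.getD a PySem.Dict.empty).insert b 1)
        else
          wd.insert a (PySem.Dict.ofList [(b, 1)])) wd)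
      PySem.Dict.empty
  word_dict.items.map (fun p => (p.1, p.2.items))

-- ===== PORT B =====
-- literal transliteration of B: pass 1 walks zip(ws, ws[1:]) per line accumulating the flat pair
-- counter (ws[1:] is slice 1..none); pass 2 regroups flat.items with the setdefault-write, which
-- is exactly `insert w1 ((getD w1 empty).insert w2 c)` (setdefault keeps w1's position, the inner
-- write overwrites in place)
def make_dict_uno_alt (file : List String) : List (String × List (String × Int)) :=
  let flat :=
    file.foldl (fun fl line =>
      ((pvWords line).zip (PySem.List.slice (pvWords line) (some 1) none)).foldl
        (fun fl p => fl.insert p (fl.getD p 0 + 1)) fl)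
      PySem.Dict.empty
  let result :=
    flat.items.foldl (fun r qc =>
      r.insert qc.1.1 ((r.getD qc.1.1 PySem.Dict.empty).insert qc.1.2 qc.2))
      PySem.Dict.empty
  result.items.map (fun p => (p.1, p.2.items))

-- ===== PRECONDITION & SPEC =====
def Spec_make_dict_uno (file : List String) (out : List (String × List (String × Int))) : Prop := out = make_dict_uno_alt file
instance (file : List String) (out : List (String × List (String × Int))) : Decidable (Spec_make_dict_uno file out) := by unfold Spec_make_dict_uno; infer_instance

-- ===== CLAIM (what is proved, stated in full; the proofs are below) =====
def Claim_equal_make_dict_uno : Prop := ∀ (file : List String), Dom_make_dict_uno file → Spec_make_dict_uno file (make_dict_uno file)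

-- ===== LEMMAS AND PROOFS =====

def pvPairList (line : String) : List (String × String) :=
  (pvWords line).zip (pvWords line).tail
def pvPairs (file : List String) : List (String × String) := file.flatMap pvPairList

theorem pvNest {α β : Type} (g : String → List β) (step : α → β → α)
    (file : List String) (init : α) :
    file.foldl (fun acc line => (g line).foldl step acc) init
      = (file.flatMap g).foldl step init := by
  induction file generalizing init with
  | nil => rfl
  | cons l t ih => rw [List.foldl_cons, ih, List.flatMap_cons, List.foldl_append]

-- the index loop over range(0, len-1) visits exactly the zipped adjacent pairs
theorem pvZipMap (ws : List String) :
    (PySem.List.pyRange 0 ((ws.length : Int) - 1)).map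
        (fun i => (PySem.List.pyGetD ws i "", PySem.List.pyGetD ws (i + 1) ""))
      = ws.zip ws.tail := by
  apply List.ext_getElem
  · simp [PySem.List.length_pyRange_one]
  · intro k h1 h2
    have hlen : k < ws.length - 1 := by
      simpa [PySem.List.length_pyRange_one] using h1
    have hi : (PySem.List.pyRange 0 ((ws.length : Int) - 1))[k]'(by
        simpa [PySem.List.length_pyRange_one] using h1) = (k : Int) := by
      rw [PySem.List.getElem_pyRange_one]; omega
    simp only [List.getElem_map, hi]
    have e1 : PySem.List.pyGetD ws (k : Int) "" = ws[k]'(by omega) := by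
      rw [PySem.List.pyGetD_natCast, List.getD_eq_getElem _ _ (by omega)]
    have e2 : PySem.List.pyGetD ws ((k : Int) + 1) "" = ws[k + 1]'(by omega) := by
      have hcast : ((k : Int) + 1) = ((k + 1 : Nat) : Int) := by push_cast; ring
      rw [hcast, PySem.List.pyGetD_natCast, List.getD_eq_getElem _ _ (by omega)]
    rw [e1, e2, List.getElem_zip]
    congr 1
    rw [List.getElem_tail]

theorem pvZipIdx {α : Type} (ws : List String) (step : α → (String × String) → α) (acc : α) :
    (PySem.List.pyRange 0 ((ws.length : Int) - 1)).foldl (fun acc i =>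
        step acc (PySem.List.pyGetD ws i "", PySem.List.pyGetD ws (i + 1) "")) acc
      = (ws.zip ws.tail).foldl step acc := by
  rw [← pvZipMap ws, List.foldl_map]

theorem pvSwap {κ ν : Type} [BEq κ] [LawfulBEq κ] (d : PySem.Dict κ ν) (k k' : κ) (v v' : ν)
    (hk : d.contains k = true) (hne : k' ≠ k) :
    (d.insert k v).insert k' v' = (d.insert k' v').insert k v := by
  apply PySem.Dict.ext
  have hkk' : (k == k') = false := by simpa using fun h => hne h.symm
  have hk'k : (k' == k) = false := by simpa using hne
  by_cases hc : d.contains k' = true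
  · rw [PySem.Dict.items_insert_of_contains _ _ (by simp [PySem.Dict.contains_insert, hc]),
        PySem.Dict.items_insert_of_contains _ _ hk,
        PySem.Dict.items_insert_of_contains _ _ (by simp [PySem.Dict.contains_insert, hk]),
        PySem.Dict.items_insert_of_contains _ _ hc, List.map_map, List.map_map]
    apply List.map_congr_left
    intro p _
    by_cases h1 : (p.1 == k) = true
    · have h2 : (p.1 == k') = false := by rw [eq_of_beq h1]; exact hkk'
      simp [h1, h2, hkk']
    · by_cases h2 : (p.1 == k') = true
      · have h3 : (p.1 == k) = false := by simpa using h1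
        simp [h2, h3, hk'k]
      · simp [h1, h2]
  · have hc' : d.contains k' = false := by simpa using hc
    rw [PySem.Dict.items_insert_of_not_contains _ _
          (by simp [PySem.Dict.contains_insert, hc', hk'k]),
        PySem.Dict.items_insert_of_contains _ _ hk,
        PySem.Dict.items_insert_of_contains _ _
          (by simp [PySem.Dict.contains_insert, hk, hkk']),
        PySem.Dict.items_insert_of_not_contains _ _ hc', List.map_append]
    simp [hk'k]

def pvNStep (wd : PySem.Dict String (PySem.Dict String Int)) (p : String × String) :
    PySem.Dict String (PySem.Dict String Int) :=
  if wd.contains p.1 then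
    if (wd.getD p.1 PySem.Dict.empty).contains p.2 then
      wd.insert p.1 ((wd.getD p.1 PySem.Dict.empty).insert p.2
        ((wd.getD p.1 PySem.Dict.empty).getD p.2 0 + 1))
    else
      wd.insert p.1 ((wd.getD p.1 PySem.Dict.empty).insert p.2 1)
  else
    wd.insert p.1 (PySem.Dict.ofList [(p.2, 1)])

def pvBump (d : PySem.Dict String (PySem.Dict String Int)) (p : String × String) (v : Int) :
    PySem.Dict String (PySem.Dict String Int) :=
  d.insert p.1 ((d.getD p.1 PySem.Dict.empty).insert p.2 v)

def pvRStep (r : PySem.Dict String (PySem.Dict String Int)) (qc : (String × String) × Int) :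
    PySem.Dict String (PySem.Dict String Int) :=
  pvBump r qc.1 qc.2

theorem pvBump_bump_self (d : PySem.Dict String (PySem.Dict String Int))
    (p : String × String) (v w : Int) : pvBump (pvBump d p v) p w = pvBump d p w := by
  unfold pvBump
  rw [PySem.Dict.getD_insert_self, PySem.Dict.insert_insert_self,
      PySem.Dict.insert_insert_self]

theorem pvBump_comm (d : PySem.Dict String (PySem.Dict String Int)) (a b x y : String)
    (v w : Int) (hk : d.contains a = true)
    (hb : (d.getD a PySem.Dict.empty).contains b = true) (hne : (x, y) ≠ (a, b)) :
    pvBump (pvBump d (a, b) v) (x, y) w = pvBump (pvBump d (x, y) w) (a, b) v := by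
  unfold pvBump
  by_cases hx : x = a
  · subst hx
    have hy : y ≠ b := by intro h; exact hne (by rw [h])
    simp only [PySem.Dict.getD_insert_self, PySem.Dict.insert_insert_self]
    rw [pvSwap _ _ _ _ _ hb hy]
  · rw [PySem.Dict.getD_insert_of_ne _ _ _ hx, PySem.Dict.getD_insert_of_ne _ _ _ (Ne.symm hx),
        pvSwap _ _ _ _ _ hk hx]

theorem pvProp (L : List ((String × String) × Int))
    (d : PySem.Dict String (PySem.Dict String Int)) (a b : String) (c : Int)
    (hk : d.contains a = true) (hb : (d.getD a PySem.Dict.empty).contains b = true)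
    (hL : ∀ q ∈ L, q.1 ≠ (a, b)) :
    L.foldl pvRStep (pvBump d (a, b) c) = pvBump (L.foldl pvRStep d) (a, b) c := by
  induction L generalizing d with
  | nil => rfl
  | cons q t ih =>
    obtain ⟨⟨x, y⟩, w⟩ := q
    have hq : (x, y) ≠ (a, b) := hL _ (List.mem_cons_self)
    simp only [List.foldl_cons]
    have step1 : pvRStep (pvBump d (a, b) c) ((x, y), w)
        = pvBump (pvRStep d ((x, y), w)) (a, b) c := pvBump_comm d a b x y c w hk hb hq
    rw [step1]
    apply ih
    · unfold pvRStep pvBump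
      simp [PySem.Dict.contains_insert, hk]
    · unfold pvRStep pvBump
      by_cases hxa : a = x
      · subst hxa
        rw [PySem.Dict.getD_insert_self]
        simp [PySem.Dict.contains_insert, hb]
      · rw [PySem.Dict.getD_insert_of_ne _ _ _ hxa]
        exact hb
    · exact fun q hq' => hL q (List.mem_cons_of_mem _ hq')

theorem pvContains_foldl (L : List ((String × String) × Int))
    (r : PySem.Dict String (PySem.Dict String Int)) (a b : String) :
    ((L.foldl pvRStep r).getD a PySem.Dict.empty).contains b
      = ((r.getD a PySem.Dict.empty).contains b || L.any (fun q => decide (q.1 = (a, b)))) := by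
  induction L generalizing r with
  | nil => simp
  | cons q t ih =>
    obtain ⟨⟨x, y⟩, w⟩ := q
    simp only [List.foldl_cons, ih, List.any_cons]
    unfold pvRStep pvBump
    by_cases hx : a = x
    · subst hx
      rw [PySem.Dict.getD_insert_self, PySem.Dict.contains_insert]
      by_cases hy : b = y
      · subst hy; simp
      · have hby : (b == y) = false := by simpa using hy
        have hyb : ¬ y = b := fun h => hy h.symm
        simp [hby, hyb, Prod.ext_iff]
    · have hax : ¬ x = a := fun h => hx h.symm
      rw [PySem.Dict.getD_insert_of_ne _ _ _ hx]
      simp [Prod.ext_iff, hax]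

theorem pvOfList_snoc_mem {α : Type} [BEq α] [LawfulBEq α] (ps : List α) (p : α) (h : p ∈ ps) :
    PySem.Set.ofList (ps ++ [p]) = PySem.Set.ofList ps := by
  simp only [PySem.Set.ofList, PySem.Set.empty_eq, List.foldl_append, List.foldl_cons,
    List.foldl_nil]
  have hmem : p ∈ List.foldl PySem.Set.add [] ps := by
    have := (PySem.Set.mem_ofList ps p).mpr h
    simpa [PySem.Set.ofList, PySem.Set.empty_eq] using this
  simp [PySem.Set.add, hmem]

theorem pvOfList_snoc_not_mem {α : Type} [BEq α] [LawfulBEq α] (ps : List α) (p : α)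
    (h : p ∉ ps) : PySem.Set.ofList (ps ++ [p]) = PySem.Set.ofList ps ++ [p] := by
  simp only [PySem.Set.ofList, PySem.Set.empty_eq, List.foldl_append, List.foldl_cons,
    List.foldl_nil]
  have hmem : p ∉ List.foldl PySem.Set.add [] ps := by
    intro hc
    exact h ((PySem.Set.mem_ofList ps p).mp (by simpa [PySem.Set.ofList, PySem.Set.empty_eq] using hc))
  simp [PySem.Set.add, hmem]

theorem pvCore (ps : List (String × String)) :
    (((PySem.Set.ofList ps).map (fun k => (k, (ps.count k : Int)))).foldl pvRStep
        PySem.Dict.empty)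
      = ps.foldl pvNStep PySem.Dict.empty := by
  induction ps using List.reverseRecOn with
  | nil => rfl
  | append_singleton ps p ih =>
    rw [List.foldl_append, List.foldl_cons, List.foldl_nil]
    by_cases hmem : p ∈ ps
    · obtain ⟨a, b⟩ := p
      have hpK : (a, b) ∈ (PySem.Set.ofList ps : List (String × String)) :=
        (PySem.Set.mem_ofList ps (a, b)).mpr hmem
      obtain ⟨K1, K2, hK⟩ := List.append_of_mem hpK
      have hnd : (PySem.Set.ofList ps : List (String × String)).Nodup := PySem.Set.nodup_ofList ps
      rw [hK] at hnd
      have hnd' := List.nodup_middle.mp hnd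
      have hp12 : (a, b) ∉ K1 ++ K2 := (List.nodup_cons.mp hnd').1
      have hp1 : ∀ k ∈ K1, k ≠ (a, b) :=
        fun k hk he => hp12 (he ▸ List.mem_append_left _ hk)
      have hp2 : ∀ k ∈ K2, k ≠ (a, b) :=
        fun k hk he => hp12 (he ▸ List.mem_append_right _ hk)
      have hcne : ∀ k, k ≠ (a, b) → ((ps ++ [(a, b)]).count k : Int) = (ps.count k : Int) := by
        intro k hk
        have hk' : ¬ (a, b) = k := fun h => hk h.symm
        rw [List.count_append]
        simp [hk']
      have hcp : ((ps ++ [(a, b)]).count (a, b) : Int) = (ps.count (a, b) : Int) + 1 := by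
        rw [List.count_append]
        push_cast [List.count_cons]
        simp
      have hm1 : List.map (fun k => (k, ((ps ++ [(a, b)]).count k : Int))) K1
          = List.map (fun k => (k, (ps.count k : Int))) K1 :=
        List.map_congr_left (fun k hk => by simp only [hcne k (hp1 k hk)])
      have hm2 : List.map (fun k => (k, ((ps ++ [(a, b)]).count k : Int))) K2
          = List.map (fun k => (k, (ps.count k : Int))) K2 :=
        List.map_congr_left (fun k hk => by simp only [hcne k (hp2 k hk)])
      have hglist : List.map (fun k => (k, ((ps ++ [(a, b)]).count k : Int)))
            (PySem.Set.ofList (ps ++ [(a, b)]))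
          = List.map (fun k => (k, (ps.count k : Int))) K1
            ++ (((a, b), (ps.count (a, b) : Int) + 1)
                :: List.map (fun k => (k, (ps.count k : Int))) K2) := by
        rw [pvOfList_snoc_mem ps _ hmem, hK, List.map_append, List.map_cons, hm1, hm2, hcp]
      rw [hglist, List.foldl_append, List.foldl_cons]
      have hih2 : (List.map (fun k => (k, (ps.count k : Int))) K2).foldl pvRStep
            (pvRStep ((List.map (fun k => (k, (ps.count k : Int))) K1).foldl pvRStep
              PySem.Dict.empty) ((a, b), (ps.count (a, b) : Int)))
          = ps.foldl pvNStep PySem.Dict.empty := by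
        rw [← ih, hK, List.map_append, List.map_cons, List.foldl_append, List.foldl_cons]
      set c : Int := (ps.count (a, b) : Int) with hc
      set X1 := (K1.map (fun k => (k, (ps.count k : Int)))).foldl pvRStep PySem.Dict.empty
        with hX1
      set L2 := K2.map (fun k => (k, (ps.count k : Int))) with hL2
      have hL2ne : ∀ q ∈ L2, q.1 ≠ (a, b) := by
        intro q hq
        rw [hL2] at hq
        obtain ⟨k, hk, rfl⟩ := List.mem_map.mp hq
        exact hp2 k hk
      have hdk : (pvBump X1 (a, b) c).contains a = true := PySem.Dict.contains_insert_self _ _ _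
      have hdb : ((pvBump X1 (a, b) c).getD a PySem.Dict.empty).contains b = true := by
        unfold pvBump
        rw [PySem.Dict.getD_insert_self]
        exact PySem.Dict.contains_insert_self _ _ _
      have hstep : pvRStep X1 ((a, b), c + 1) = pvBump (pvBump X1 (a, b) c) (a, b) (c + 1) :=
        (pvBump_bump_self X1 (a, b) c (c + 1)).symm
      rw [hstep, pvProp L2 _ a b (c + 1) hdk hdb hL2ne]
      have hYfold : L2.foldl pvRStep (pvBump X1 (a, b) c) = ps.foldl pvNStep PySem.Dict.empty :=
        hih2
      have hYY : ps.foldl pvNStep PySem.Dict.empty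
          = pvBump (ps.foldl pvNStep PySem.Dict.empty) (a, b) c := by
        conv_lhs => rw [← hYfold,
          show pvBump X1 (a, b) c = pvBump (pvBump X1 (a, b) c) (a, b) c from
            (pvBump_bump_self X1 (a, b) c c).symm,
          pvProp L2 _ a b c hdk hdb hL2ne, hYfold]
      rw [hYfold]
      conv_rhs => rw [hYY]
      unfold pvNStep pvBump
      rw [if_pos (PySem.Dict.contains_insert_self _ _ _), PySem.Dict.getD_insert_self,
          if_pos (PySem.Dict.contains_insert_self _ _ _), PySem.Dict.getD_insert_self,
          PySem.Dict.insert_insert_self, PySem.Dict.insert_insert_self]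
    · obtain ⟨a, b⟩ := p
      have hcne : ∀ k ∈ (PySem.Set.ofList ps : List (String × String)),
          ((ps ++ [(a, b)]).count k : Int) = (ps.count k : Int) := by
        intro k hk
        have hkps : k ∈ ps := (PySem.Set.mem_ofList ps k).mp hk
        have hk' : ¬ (a, b) = k := fun h => hmem (h ▸ hkps)
        rw [List.count_append]
        simp [hk']
      have hcp : ((ps ++ [(a, b)]).count (a, b) : Int) = 1 := by
        rw [List.count_append]
        have h0 : ps.count (a, b) = 0 := List.count_eq_zero.mpr hmem
        simp [h0]
      have hglist : List.map (fun k => (k, ((ps ++ [(a, b)]).count k : Int)))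
            (PySem.Set.ofList (ps ++ [(a, b)]))
          = List.map (fun k => (k, (ps.count k : Int))) (PySem.Set.ofList ps)
            ++ [((a, b), (1 : Int))] := by
        rw [pvOfList_snoc_not_mem ps _ hmem, List.map_append, List.map_cons, List.map_nil, hcp]
        congr 1
        exact List.map_congr_left (fun k hk => by simp only [hcne k hk])
      rw [hglist, List.foldl_append, List.foldl_cons, List.foldl_nil, ih]
      have hnb : (((ps.foldl pvNStep PySem.Dict.empty).getD a PySem.Dict.empty).contains b)
          = false := by
        rw [← ih, pvContains_foldl]
        have h1 : ((PySem.Dict.empty (κ := String)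
            (ν := PySem.Dict String Int)).getD a PySem.Dict.empty).contains b = false := rfl
        rw [h1]
        simp only [Bool.false_or, List.any_map, List.any_eq_false]
        intro k hk
        simp only [Function.comp_apply, decide_eq_true_eq]
        exact fun he => hmem (he ▸ (PySem.Set.mem_ofList ps k).mp hk)
      have key : ∀ N' : PySem.Dict String (PySem.Dict String Int),
          ((N'.getD a PySem.Dict.empty).contains b) = false →
          pvRStep N' ((a, b), 1) = pvNStep N' (a, b) := by
        intro N' hnb'
        unfold pvRStep pvBump pvNStep
        by_cases hca : N'.contains a
        · rw [if_pos hca, if_neg (by simp [hnb'])]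
        · rw [if_neg (by simp [hca]),
              PySem.Dict.getD_of_not_contains _ _ (by simpa using hca)]
          rfl
      exact key _ hnb

-- A's port is the fold of pvNStep over the concatenated adjacent-pair list
theorem pvA_eq (file : List String) :
    make_dict_uno file = ((pvPairs file).foldl pvNStep PySem.Dict.empty).items.map
      (fun p => (p.1, p.2.items)) := by
  simp only [make_dict_uno]
  have hline : (fun (wd : PySem.Dict String (PySem.Dict String Int)) (line : String) =>
      (PySem.List.pyRange 0 (((pvWords line).length : Int) - 1)).foldl (fun wd i =>
        let a := PySem.List.pyGetD (pvWords line) i ""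
        let b := PySem.List.pyGetD (pvWords line) (i + 1) ""
        if wd.contains a then
          if (wd.getD a PySem.Dict.empty).contains b then
            wd.insert a ((wd.getD a PySem.Dict.empty).insert b
              ((wd.getD a PySem.Dict.empty).getD b 0 + 1))
          else
            wd.insert a ((wd.getD a PySem.Dict.empty).insert b 1)
        else
          wd.insert a (PySem.Dict.ofList [(b, 1)])) wd)
      = (fun wd line => (pvPairList line).foldl pvNStep wd) := by
    funext wd line
    exact pvZipIdx (pvWords line) pvNStep wd
  rw [hline, pvNest pvPairList pvNStep file PySem.Dict.empty]
  rfl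

-- B's port is the regroup fold over the items of the pair counter
theorem pvB_eq (file : List String) :
    make_dict_uno_alt file
      = (((PySem.Set.ofList (pvPairs file)).map
            (fun k => (k, ((pvPairs file).count k : Int)))).foldl pvRStep
          PySem.Dict.empty).items.map (fun p => (p.1, p.2.items)) := by
  simp only [make_dict_uno_alt]
  have hline : (fun (fl : PySem.Dict (String × String) Int) (line : String) =>
      ((pvWords line).zip (PySem.List.slice (pvWords line) (some 1) none)).foldl
        (fun fl p => fl.insert p (fl.getD p 0 + 1)) fl)
      = (fun fl line => (pvPairList line).foldl
          (fun (d : PySem.Dict (String × String) Int) p => d.insert p (d.getD p 0 + 1)) fl) := by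
    funext fl line
    rw [PySem.List.slice_from_one]
    rfl
  rw [hline,
      pvNest pvPairList (fun (d : PySem.Dict (String × String) Int) p =>
        d.insert p (d.getD p 0 + 1)) file PySem.Dict.empty,
      PySem.Dict.foldl_insert_getD_add_one_eq_counter, PySem.Dict.items_counter]
  have hfun : (fun (r : PySem.Dict String (PySem.Dict String Int)) qc =>
      r.insert qc.1.1 ((r.getD qc.1.1 PySem.Dict.empty).insert qc.1.2 qc.2)) = pvRStep := by
    funext r qc
    rfl
  rw [hfun]
  rfl

-- ===== VERDICT (by name: the statement is the Claim_ definition above) =====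
theorem make_dict_uno_spec : Claim_equal_make_dict_uno := by
  intro file _
  unfold Spec_make_dict_uno
  rw [pvA_eq, pvB_eq, pvCore]
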